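-- pv_equiv track=rewrite | github.com/SRHridoy/CN | Simulation/1.bitbyte.py | bit_unstuffing
-- ===== SOURCE A (Python) =====
-- def bit_unstuffing(stuffed):
--     count = 0
--     unstuffed = ""
--     for bit in stuffed:
--         if bit == '1':
--             count += 1
--             unstuffed += bit
--         else:
--             if count == 5 and bit == '0':
--                 count = 0  # Remove stuffed 0
--             else:
--                 unstuffed += bit
--             count = 0
--     return unstuffed
-- ===== SOURCE B (Python) =====
-- def bit_unstuffing(stuffed):
--     # Scan maximal runs of equal characters; a run of zeros that immediately
--     # follows a run of exactly five '1's loses its first (stuffed) zero.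
--     pieces = []
--     i, n = 0, len(stuffed)
--     while i < n:
--         j = i + 1
--         while j < n and stuffed[j] == stuffed[i]:
--             j += 1
--         run = stuffed[i:j]
--         if stuffed[i] == '0' and pieces and pieces[-1] == '11111':
--             run = run[1:]
--         pieces.append(run)
--         i = j
--     return ''.join(pieces)
-- ===== Notes on version B (the rewrite author's own statement) =====
-- stated objective: alternative
-- what changed: B replaces A's per-character counter loop with a run-length scan: it splits the input into maximal runs of equal characters and drops the leading zero of a zero-run whose preceding run consists of exactly five ones.
import Mathlib
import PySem

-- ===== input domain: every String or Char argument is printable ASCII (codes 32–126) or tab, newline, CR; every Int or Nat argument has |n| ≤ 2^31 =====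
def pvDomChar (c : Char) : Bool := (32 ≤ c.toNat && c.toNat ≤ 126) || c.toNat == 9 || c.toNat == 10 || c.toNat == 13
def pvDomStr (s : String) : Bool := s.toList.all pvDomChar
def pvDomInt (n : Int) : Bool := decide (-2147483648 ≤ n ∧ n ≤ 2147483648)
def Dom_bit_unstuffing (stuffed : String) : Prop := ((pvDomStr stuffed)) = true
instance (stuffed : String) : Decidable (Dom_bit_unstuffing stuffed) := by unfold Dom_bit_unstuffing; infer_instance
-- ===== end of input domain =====

-- B replaces A's per-character counter loop with a run-length scan over maximal runs of
-- equal characters (alternative decomposition; same asymptotic cost).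

-- ===== PORT A =====
-- the for-loop of A, state = (count, unstuffed)
def bitUnstuffGoA : List Char → Int → List Char → List Char
  | [], _, unstuffed => unstuffed
  | bit :: rest, count, unstuffed =>
    if bit = '1' then
      bitUnstuffGoA rest (count + 1) (unstuffed ++ [bit])
    else if count = 5 ∧ bit = '0' then
      bitUnstuffGoA rest 0 unstuffed
    else
      bitUnstuffGoA rest 0 (unstuffed ++ [bit])

def bit_unstuffing (stuffed : String) : String :=
  String.mk (bitUnstuffGoA stuffed.toList 0 [])

-- ===== PORT B =====
-- B's outer while-loop: peel off one maximal run per step, append its (possibly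
-- shortened) piece; pieces are kept as lists of chars ('' .join at the end).
def bitUnstuffRuns : List Char → List (List Char) → List (List Char)
  | [], pieces => pieces
  | c :: rest, pieces =>
    let run := c :: rest.takeWhile (· = c)
    let rest' := rest.dropWhile (· = c)
    let run' := if c = '0' ∧ pieces.getLast? = some ['1', '1', '1', '1', '1'] then run.tail else run
    bitUnstuffRuns rest' (pieces ++ [run'])
termination_by l _ => l.length
decreasing_by simpa using Nat.lt_succ_of_le (List.length_dropWhile_le _ _)

def bit_unstuffing_alt (stuffed : String) : String :=
  String.mk (bitUnstuffRuns stuffed.toList []).flatten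

-- ===== PRECONDITION & SPEC =====
def Spec_bit_unstuffing (stuffed : String) (out : String) : Prop := out = bit_unstuffing_alt stuffed
instance (stuffed : String) (out : String) : Decidable (Spec_bit_unstuffing stuffed out) := by unfold Spec_bit_unstuffing; infer_instance

-- ===== CLAIM (what is proved, stated in full; the proofs are below) =====
def Claim_equal_bit_unstuffing : Prop := ∀ (stuffed : String), Dom_bit_unstuffing stuffed → Spec_bit_unstuffing stuffed (bit_unstuffing stuffed)

-- ===== LEMMAS AND PROOFS =====

-- A over a run of '1's just counts them and copies them.
theorem goA_ones (run : List Char) (h : ∀ x ∈ run, x = '1') :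
    ∀ (rest : List Char) (count : Int) (acc : List Char),
      bitUnstuffGoA (run ++ rest) count acc = bitUnstuffGoA rest (count + run.length) (acc ++ run) := by
  induction run with
  | nil => intro rest count acc; simp
  | cons c t ih =>
    intro rest count acc
    have hc : c = '1' := h c (by simp)
    have ht : ∀ x ∈ t, x = '1' := fun x hx => h x (by simp [hx])
    subst hc
    simp only [List.cons_append, bitUnstuffGoA, ih ht]
    have h1 : count + 1 + (t.length : Int) = count + (('1' :: t).length : Int) := by
      simp only [List.length_cons]; push_cast; ring
    have h2 : acc ++ ['1'] ++ t = acc ++ '1' :: t := by simp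
    rw [h1, h2]; simp

-- A over a run of non-'1' chars with count already 0 copies them.
theorem goA_flush (run : List Char) (h : ∀ x ∈ run, x ≠ '1') :
    ∀ (rest : List Char) (acc : List Char),
      bitUnstuffGoA (run ++ rest) 0 acc = bitUnstuffGoA rest 0 (acc ++ run) := by
  induction run with
  | nil => intro rest acc; simp
  | cons c t ih =>
    intro rest acc
    have hc : c ≠ '1' := h c (by simp)
    have ht : ∀ x ∈ t, x ≠ '1' := fun x hx => h x (by simp [hx])
    have h5 : ¬ ((0 : Int) = 5 ∧ c = '0') := by rintro ⟨h0, -⟩; exact absurd h0 (by decide)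
    simp only [List.cons_append, bitUnstuffGoA, if_neg hc, if_neg h5, ih ht]
    simp

theorem all_ones_eq_five (run : List Char) (h : ∀ x ∈ run, x = '1') :
    run = ['1', '1', '1', '1', '1'] ↔ run.length = 5 := by
  constructor
  · intro he; simp [he]
  · intro hl
    have : run = List.replicate run.length '1' := List.eq_replicate_length.mpr h
    rw [hl] at this; simpa using this

-- One-step unfolding of B's run loop.
theorem runs_cons (c : Char) (rest : List Char) (pieces : List (List Char)) :
    bitUnstuffRuns (c :: rest) pieces =
      bitUnstuffRuns (rest.dropWhile (· = c))
        (pieces ++ [if c = '0' ∧ pieces.getLast? = some ['1', '1', '1', '1', '1']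
                    then (c :: rest.takeWhile (· = c)).tail
                    else c :: rest.takeWhile (· = c)]) := by
  rw [bitUnstuffRuns]

theorem head_dropWhile_ne (l : List Char) (p : Char → Bool) (x : Char)
    (h : (l.dropWhile p).head? = some x) : p x = false := by
  induction l with
  | nil => simp [List.dropWhile] at h
  | cons c t ih =>
    rw [List.dropWhile_cons] at h
    split at h
    · exact ih h
    · next hp => simp at h; simpa [h] using hp

-- Main invariant lemma, by induction on a length bound (one maximal run per step).
theorem goA_eq_runs_aux (n : Nat) :
    ∀ (l : List Char), l.length ≤ n →
    ∀ (count : Int) (pieces : List (List Char)),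
      (l.head? = some '1' → count = 0) →
      (count = 5 ↔ pieces.getLast? = some ['1', '1', '1', '1', '1']) →
      bitUnstuffGoA l count pieces.flatten = (bitUnstuffRuns l pieces).flatten := by
  induction n with
  | zero =>
    intro l hl count pieces _ _
    have : l = [] := List.eq_nil_of_length_eq_zero (Nat.le_zero.mp hl)
    subst this; simp [bitUnstuffGoA, bitUnstuffRuns]
  | succ n ih =>
    intro l hl count pieces hhead hinv
    match l with
    | [] => simp [bitUnstuffGoA, bitUnstuffRuns]
    | c :: rest =>
      have hlr : rest.length ≤ n := Nat.le_of_succ_le_succ hl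
      have hdlen : (rest.dropWhile (· = c)).length ≤ n :=
        le_trans (List.length_dropWhile_le _ _) hlr
      have htd : rest.takeWhile (· = c) ++ rest.dropWhile (· = c) = rest :=
        List.takeWhile_append_dropWhile
      have htall : ∀ x ∈ rest.takeWhile (· = c), x = c := by
        intro x hx
        have := List.mem_takeWhile_imp hx
        simpa using this
      have hdhead : ∀ x, (rest.dropWhile (· = c)).head? = some x → x ≠ c := by
        intro x hx
        have := head_dropWhile_ne rest _ x hx
        simpa using this
      rw [runs_cons]
      by_cases hc1 : c = '1'
      · -- a maximal run of '1's
        subst hc1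
        have hc0 : count = 0 := hhead rfl
        subst hc0
        have hcond : ¬('1' = '0' ∧ pieces.getLast? = some ['1', '1', '1', '1', '1']) := by
          rintro ⟨h, -⟩; exact absurd h (by decide)
        rw [if_neg hcond]
        have hsplit : ('1' :: rest) = ('1' :: rest.takeWhile (· = '1')) ++ rest.dropWhile (· = '1') := by
          rw [List.cons_append, htd]
        have hones : ∀ x ∈ '1' :: rest.takeWhile (· = '1'), x = '1' := by
          intro x hx
          rcases List.mem_cons.mp hx with h | h
          · exact h
          · exact htall x h
        rw [hsplit, goA_ones _ hones]
        have hacc : pieces.flatten ++ ('1' :: rest.takeWhile (· = '1')) =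
            (pieces ++ ['1' :: rest.takeWhile (· = '1')]).flatten := by simp
        rw [hacc]
        apply ih _ hdlen
        · intro hh
          exact absurd rfl (hdhead '1' hh)
        · rw [List.getLast?_append_cons]
          simp only [List.getLast?_singleton]
          constructor
          · intro h5
            have : ('1' :: rest.takeWhile (· = '1')).length = 5 := by
              have := h5; omega
            rw [(all_ones_eq_five _ hones).mpr this]
          · intro heq
            have : ('1' :: rest.takeWhile (· = '1')).length = 5 := by
              rw [(all_ones_eq_five _ hones).mp (by injection heq)]
            omega
      · -- a maximal run of non-'1' characters
        have htne : ∀ x ∈ rest.takeWhile (· = c), x ≠ '1' := fun x hx => (htall x hx) ▸ hc1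
        simp only [bitUnstuffGoA, if_neg hc1]
        by_cases hdrop : count = 5 ∧ c = '0'
        · -- the stuffed zero is removed
          rw [if_pos hdrop, if_pos ⟨hdrop.2, hinv.mp hdrop.1⟩]
          have hsplit : rest = rest.takeWhile (· = c) ++ rest.dropWhile (· = c) := htd.symm
          conv_lhs => rw [hsplit]
          rw [goA_flush _ htne]
          have hacc : pieces.flatten ++ rest.takeWhile (· = c) =
              (pieces ++ [(c :: rest.takeWhile (· = c)).tail]).flatten := by simp
          rw [hacc]
          apply ih _ hdlen
          · intro _; rfl
          · rw [List.getLast?_append_cons]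
            simp only [List.getLast?_singleton, List.tail_cons]
            constructor
            · intro h5; exact absurd h5 (by decide)
            · intro heq
              have h1 : '1' ∈ rest.takeWhile (· = c) := by
                rw [show rest.takeWhile (· = c) = ['1', '1', '1', '1', '1'] from by injection heq]
                simp
              exact absurd (htall _ h1) (hdrop.2 ▸ (by decide))
        · -- an ordinary character is copied
          rw [if_neg hdrop]
          have hcond : ¬(c = '0' ∧ pieces.getLast? = some ['1', '1', '1', '1', '1']) := by
            rintro ⟨h0, hf⟩; exact hdrop ⟨hinv.mpr hf, h0⟩
          rw [if_neg hcond]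
          have hsplit : rest = rest.takeWhile (· = c) ++ rest.dropWhile (· = c) := htd.symm
          conv_lhs => rw [hsplit]
          rw [goA_flush _ htne]
          have hacc : pieces.flatten ++ [c] ++ rest.takeWhile (· = c) =
              (pieces ++ [c :: rest.takeWhile (· = c)]).flatten := by simp
          rw [hacc]
          apply ih _ hdlen
          · intro _; rfl
          · rw [List.getLast?_append_cons]
            simp only [List.getLast?_singleton]
            constructor
            · intro h5; exact absurd h5 (by decide)
            · intro heq
              have hl5 : c :: rest.takeWhile (· = c) = ['1', '1', '1', '1', '1'] := by
                injection heq
              exact absurd (by injection hl5 : c = '1') hc1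

theorem goA_eq_runs (l : List Char) (count : Int) (pieces : List (List Char))
    (hhead : l.head? = some '1' → count = 0)
    (hinv : count = 5 ↔ pieces.getLast? = some ['1', '1', '1', '1', '1']) :
    bitUnstuffGoA l count pieces.flatten = (bitUnstuffRuns l pieces).flatten :=
  goA_eq_runs_aux l.length l (le_refl _) count pieces hhead hinv

-- ===== VERDICT (by name: the statement is the Claim_ definition above) =====
theorem bit_unstuffing_spec : Claim_equal_bit_unstuffing := by
  intro stuffed _
  unfold Spec_bit_unstuffing bit_unstuffing bit_unstuffing_alt
  exact congrArg String.mk (goA_eq_runs stuffed.toList 0 [] (fun _ => rfl) (by simp))
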